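-- pv_equiv track=rewrite | github.com/pal03377/reverse-templating | reverse-templating.py | placeholder_find_helper
-- ===== SOURCE A (Python) =====
-- import re, itertools
--
-- def get_all_occurrence_ends(sub, a_str):
--     start = 0
--     while True:
--         start = a_str.find(sub, start)
--         if start == -1: return
--         yield start + len(sub)
--         start += 1
--
-- def is_ascending_sequence(seq):
--     """2 same values next to each other not allowed"""
--     if seq == []:
--         return True
--     for index in range(1, len(seq)):
--         if seq[index] <= seq[index-1]:
--             return False
--     return True
--
-- def placeholder_find_helper(template, text, case_sensitive=True):
--     """
--     helper function of get_placeholders_in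
--     returns list of list of potential placeholders in text
--     takes template as a list of strings, between the strings are the placeholders"""
--     text_to_search_in = text
--     template_to_search_in = template
--     if not case_sensitive:
--         text_to_search_in = text_to_search_in.lower()
--         template_to_search_in = [part.lower() for part in template_to_search_in]
--     # get all occurrences of all template text parts
--     part_occ = [get_all_occurrence_ends(
--         part, text_to_search_in) for part in template_to_search_in]
--     # get all combinations with an element from the first
--     # part_occ sublist, than with an element from the next one and
--     # so on
--     combi_occ = itertools.product(*part_occ)
--     # filter those out with an ascending number sequence
--     # => placeholder indices must be in order
--     combi_occ = filter(is_ascending_sequence, combi_occ)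
--     # trick for later
--     template.append("")
--     # now make the indices ~great~ text again
--     to_return = []
--     for placeholder_indices in combi_occ:
--         to_return.append([])
--         template_index = 0
--         if placeholder_indices[0] > 0:
--             # text before the 1st placeholder in template, not needed
--             # remove it
--             template_index = 1
--         for p_i_index in range(len(placeholder_indices)):
--             placeholder_index = placeholder_indices[p_i_index]
--             if p_i_index+1 >= len(placeholder_indices):
--                 next_placeholder_index = -1
--             else:
--                 next_placeholder_index = placeholder_indices[p_i_index+1]
--             # start is placeholder_index,
--             # end is next_placeholder_index-len(template[template_index])
--             to_return[-1].append(
--                 text[placeholder_index:(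
--                     next_placeholder_index-len(template[template_index]))]
--             )
--             template_index += 1
--     return to_return
-- ===== SOURCE B (Python) =====
-- # B: instead of materialising the full cartesian product of occurrence-end lists
-- # and filtering ascending tuples (as A does), grow the set of strictly-ascending
-- # prefixes level by level, pruning every non-ascending extension immediately.
-- # Return-value equivalence only: A appends "" to the template list in place; B
-- # does not mutate its arguments.
--
-- def _occurrence_ends(sub, a_str):
--     ends = []
--     start = 0
--     while True:
--         start = a_str.find(sub, start)
--         if start == -1:
--             return ends
--         ends.append(start + len(sub))
--         start += 1
--
-- def _part_len(template, k):
--     return len(template[k]) if k < len(template) else 0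
--
-- def _render(template, text, idxs):
--     offset = 1 if idxs[0] > 0 else 0
--     nexts = idxs[1:] + [-1]
--     lens = [_part_len(template, j + offset) for j in range(len(idxs))]
--     return [text[p:n - L] for (p, n), L in zip(zip(idxs, nexts), lens)]
--
-- def placeholder_find_helper(template, text, case_sensitive=True):
--     t = text if case_sensitive else text.lower()
--     parts = template if case_sensitive else [p.lower() for p in template]
--     occs = [_occurrence_ends(p, t) for p in parts]
--     if any(not r for r in occs):
--         return []  # some part never occurs: no combination exists
--     prefixes = [[]]
--     for r in occs:
--         prefixes = [p + [e] for p in prefixes for e in r if not p or e > p[-1]]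
--     return [_render(template, text, p) for p in prefixes]
-- ===== Notes on version B (the rewrite author's own statement) =====
-- stated objective: alternative
-- what changed: A materialises the full cartesian product of all occurrence-end lists and filters the ascending tuples afterwards; B grows the list of strictly-ascending prefixes level by level (discarding non-ascending extensions immediately and short-circuiting when some part never occurs), rendering only at the end; on random inputs both are dominated by the substring scans, so no speed is claimed.
import Mathlib
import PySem

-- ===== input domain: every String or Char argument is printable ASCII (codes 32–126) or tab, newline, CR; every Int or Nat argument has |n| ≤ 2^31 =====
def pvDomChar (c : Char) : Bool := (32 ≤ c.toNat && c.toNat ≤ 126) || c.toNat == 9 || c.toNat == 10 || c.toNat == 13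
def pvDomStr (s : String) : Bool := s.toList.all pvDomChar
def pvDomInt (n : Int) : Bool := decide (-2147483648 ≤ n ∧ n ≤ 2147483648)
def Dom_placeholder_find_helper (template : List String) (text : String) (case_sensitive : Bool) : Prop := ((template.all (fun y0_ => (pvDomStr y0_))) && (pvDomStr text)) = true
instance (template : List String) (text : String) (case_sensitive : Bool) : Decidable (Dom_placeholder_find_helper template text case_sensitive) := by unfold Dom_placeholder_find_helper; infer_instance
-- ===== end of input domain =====

-- B replaces A's full-cartesian-product-then-filter by a level-by-level expansion of
-- strictly-ascending prefixes, pruning every non-ascending extension immediately.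
-- Return-value equivalence only: Python A appends "" to the template list in place; B does not mutate.

-- ===== PORT A =====
-- get_all_occurrence_ends: the find-loop, shared verbatim by Source A's generator and
-- Source B's _occurrence_ends (identical loop in both sources).  Fuel bounds the loop:
-- `start` strictly increases and a successful find needs start ≤ len(s), so
-- s.length + 2 iterations always suffice (the fuel guard only makes it total).
def occEndsGo (sub s : String) : Nat → Int → List Int
  | 0, _ => []
  | fuel + 1, start =>
    let f := PySem.Str.findFrom s sub start
    if f = -1 then []
    else (f + (PySem.Str.len sub : Int)) :: occEndsGo sub s fuel (f + 1)

def occEnds (sub s : String) : List Int := occEndsGo sub s ((PySem.Str.len s).toNat + 2) 0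

-- itertools.product(*part_occ)
def pyProduct : List (List Int) → List (List Int)
  | [] => [[]]
  | l :: ls => l.flatMap (fun x => (pyProduct ls).map (fun c => x :: c))

-- is_ascending_sequence's index loop over consecutive pairs
def isAscGo : Int → List Int → Bool
  | _, [] => true
  | prev, y :: ys => if y ≤ prev then false else isAscGo y ys

def isAsc : List Int → Bool
  | [] => true
  | x :: xs => isAscGo x xs

-- the inner for-loop of A building one result list; tmplApp is template after the
-- in-place append of "" (template_index is always < tmplApp.length in A's flow, so
-- getD with default "" is exact there)
def renderALoop (tmplApp : List String) (text : String) : Nat → List Int → List String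
  | _, [] => []
  | tidx, [p] =>
      [PySem.Str.slice text (some p) (some (-1 - (PySem.Str.len (tmplApp.getD tidx "") : Int)))]
  | tidx, p :: q :: rest =>
      PySem.Str.slice text (some p) (some (q - (PySem.Str.len (tmplApp.getD tidx "") : Int)))
        :: renderALoop tmplApp text (tidx + 1) (q :: rest)

def renderA (tmplApp : List String) (text : String) (idxs : List Int) : List String :=
  match idxs with
  | [] => []   -- unreachable: only template = [] yields the empty combination, where Python A raises IndexError (excluded by Pre_)
  | i0 :: _ => renderALoop tmplApp text (if 0 < i0 then 1 else 0) idxs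

def placeholder_find_helper (template : List String) (text : String) (case_sensitive : Bool) : List (List String) :=
  let textS := if case_sensitive then text else PySem.Str.lower text
  let parts := if case_sensitive then template else template.map PySem.Str.lower
  let partOcc := parts.map (fun p => occEnds p textS)
  let combi := (pyProduct partOcc).filter isAsc
  let tmplApp := template ++ [""]
  combi.foldl (fun acc c => acc ++ [renderA tmplApp text c]) []

-- ===== PORT B =====
def partLen (tmpl : List String) (k : Nat) : Int :=
  if k < tmpl.length then (PySem.Str.len (tmpl.getD k "") : Int) else 0

def renderB (tmpl : List String) (text : String) (idxs : List Int) : List String :=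
  match idxs with
  | [] => []   -- unreachable: Source B's _render raises IndexError on [] (only template = [], excluded by Pre_)
  | i0 :: _ =>
    let offset := if 0 < i0 then 1 else 0
    let nexts := idxs.drop 1 ++ [(-1 : Int)]
    let lens := (List.range idxs.length).map (fun j => partLen tmpl (j + offset))
    List.zipWith (fun (pn : Int × Int) L => PySem.Str.slice text (some pn.1) (some (pn.2 - L)))
      (idxs.zip nexts) lens

def okExt (chosen : List Int) (e : Int) : Bool :=
  match chosen.getLast? with
  | none => true
  | some l => l < e

-- one level of the prefix expansion: [p + [e] for p in prefixes for e in r if not p or e > p[-1]]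
def extendAsc (prefixes : List (List Int)) (r : List Int) : List (List Int) :=
  prefixes.flatMap (fun p => r.flatMap (fun e => if okExt p e then [p ++ [e]] else []))

def placeholder_find_helper_alt (template : List String) (text : String) (case_sensitive : Bool) : List (List String) :=
  let textS := if case_sensitive then text else PySem.Str.lower text
  let parts := if case_sensitive then template else template.map PySem.Str.lower
  let occs := parts.map (fun p => occEnds p textS)
  if occs.any (fun r => r.isEmpty) then []  -- some part never occurs: no combination exists
  else (occs.foldl extendAsc [[]]).map (fun p => renderB template text p)

-- ===== PRECONDITION & SPEC =====
-- Pre_ excludes only template = [], on which Python A raises IndexError (placeholder_indices[0] on the empty tuple).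
def Pre_placeholder_find_helper (template : List String) (text : String) (case_sensitive : Bool) : Prop :=
  template ≠ []
instance (template : List String) (text : String) (case_sensitive : Bool) : Decidable (Pre_placeholder_find_helper template text case_sensitive) := by unfold Pre_placeholder_find_helper; infer_instance

def pvWitness_placeholder_find_helper : List String × String × Bool := (["a", "b"], "a1b2ab", true)

def Spec_placeholder_find_helper (template : List String) (text : String) (case_sensitive : Bool) (out : List (List String)) : Prop := out = placeholder_find_helper_alt template text case_sensitive
instance (template : List String) (text : String) (case_sensitive : Bool) (out : List (List String)) : Decidable (Spec_placeholder_find_helper template text case_sensitive out) := by unfold Spec_placeholder_find_helper; infer_instance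

-- ===== CLAIM (what is proved, stated in full; the proofs are below) =====
def Claim_equal_placeholder_find_helper : Prop := ∀ (template : List String) (text : String) (case_sensitive : Bool), Dom_placeholder_find_helper template text case_sensitive → Pre_placeholder_find_helper template text case_sensitive → Spec_placeholder_find_helper template text case_sensitive (placeholder_find_helper template text case_sensitive)

-- ===== LEMMAS AND PROOFS =====

theorem foldl_append_singleton (f : List Int → List String) :
    ∀ (l : List (List Int)) (init : List (List String)),
      l.foldl (fun acc c => acc ++ [f c]) init = init ++ l.map f := by
  intro l
  induction l with
  | nil => intro init; simp
  | cons x xs ih => intro init; simp [List.foldl_cons, ih]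

-- ascending-check seen from an optional last chosen element (bridges A's filter to B's DFS guard)
def ascFrom : Option Int → List Int → Bool
  | none, c => isAsc c
  | some l, c => isAscGo l c

theorem partLen_eq_app (tmpl : List String) (k : Nat) :
    partLen tmpl k = (PySem.Str.len ((tmpl ++ [""]).getD k "") : Int) := by
  unfold partLen
  by_cases h : k < tmpl.length
  · simp [h, List.getD, List.getElem?_append_left h]
  · simp only [h, if_false]
    rcases Nat.lt_or_ge k (tmpl.length + 1) with h2 | h2
    · have hk : k = tmpl.length := by omega
      subst hk; simp [List.getD]
    · have hn : (tmpl ++ [""])[k]? = none := List.getElem?_eq_none (by simp; omega)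
      simp [List.getD, hn]

theorem renderALoop_eq (tmpl : List String) (text : String) :
    ∀ (idxs : List Int) (tidx : Nat),
      renderALoop (tmpl ++ [""]) text tidx idxs =
        List.zipWith (fun (pn : Int × Int) L => PySem.Str.slice text (some pn.1) (some (pn.2 - L)))
          (idxs.zip (idxs.drop 1 ++ [(-1 : Int)]))
          ((List.range idxs.length).map (fun j => partLen tmpl (j + tidx))) := by
  intro idxs
  induction idxs with
  | nil => intro tidx; simp [renderALoop]
  | cons p rest ih =>
    intro tidx
    cases rest with
    | nil =>
      simp [renderALoop, List.range_succ, partLen_eq_app]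
    | cons q rest' =>
      have hr : List.range (rest'.length + 1 + 1) =
          0 :: (List.range (rest'.length + 1)).map Nat.succ := List.range_succ_eq_map
      simp only [renderALoop, List.length_cons, List.drop_succ_cons, List.drop_zero,
        hr, List.map_cons, List.map_map, List.zip_cons_cons, List.zipWith_cons_cons]
      refine List.cons_eq_cons.mpr ⟨?_, ?_⟩
      · rw [partLen_eq_app]; norm_num
      · rw [ih (tidx + 1)]
        congr 1
        apply List.map_congr_left
        intro j _
        simp only [Function.comp_apply]
        congr 1
        omega

theorem renderA_eq (tmpl : List String) (text : String) (idxs : List Int) :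
    renderA (tmpl ++ [""]) text idxs = renderB tmpl text idxs := by
  cases idxs with
  | nil => rfl
  | cons i0 rest => simp [renderA, renderB, renderALoop_eq]

theorem ascFrom_nil (o : Option Int) : ascFrom o [] = true := by
  cases o <;> rfl
theorem ascFrom_cons (chosen : List Int) (e : Int) (c : List Int) :
    ascFrom chosen.getLast? (e :: c) = (okExt chosen e && ascFrom (some e) c) := by
  unfold okExt
  cases h : chosen.getLast? with
  | none => simp [ascFrom, isAsc]
  | some l =>
    simp only [ascFrom, isAscGo]
    by_cases hle : e ≤ l
    · simp [hle, show ¬ l < e by omega]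
    · simp [hle, show l < e by omega]
theorem filter_flatMap' {α β : Type} (l : List α) (g : α → List β) (p : β → Bool) :
    (l.flatMap g).filter p = l.flatMap (fun a => (g a).filter p) := by
  induction l with
  | nil => rfl
  | cons x xs ih => simp [List.flatMap_cons, List.filter_append, ih]
theorem map_flatMap' {α β γ : Type} (l : List α) (g : α → List β) (f : β → γ) :
    (l.flatMap g).map f = l.flatMap (fun a => (g a).map f) := by
  induction l with
  | nil => rfl
  | cons x xs ih => simp [List.flatMap_cons, ih]

theorem extendAsc_append (P1 P2 : List (List Int)) (r : List Int) :
    extendAsc (P1 ++ P2) r = extendAsc P1 r ++ extendAsc P2 r := by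
  simp [extendAsc]

theorem foldl_extendAsc_nil : ∀ (rest : List (List Int)),
    rest.foldl extendAsc [] = [] := by
  intro rest
  induction rest with
  | nil => rfl
  | cons r rs ih => simpa [extendAsc] using ih

theorem foldl_extendAsc_append (rest : List (List Int)) :
    ∀ (P1 P2 : List (List Int)),
      rest.foldl extendAsc (P1 ++ P2) = rest.foldl extendAsc P1 ++ rest.foldl extendAsc P2 := by
  induction rest with
  | nil => intro P1 P2; rfl
  | cons r rs ih =>
    intro P1 P2
    simp only [List.foldl_cons, extendAsc_append, ih]

theorem foldl_extendAsc_flatMap (rest : List (List Int)) (l : List Int) (f : Int → List (List Int)) :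
    rest.foldl extendAsc (l.flatMap f) = l.flatMap (fun e => rest.foldl extendAsc (f e)) := by
  induction l with
  | nil => simpa using foldl_extendAsc_nil rest
  | cons x xs ih => simp [List.flatMap_cons, foldl_extendAsc_append, ih]

theorem pyProduct_eq_nil_of_mem_nil :
    ∀ (ls : List (List Int)), (ls.any (fun r => r.isEmpty)) = true → pyProduct ls = [] := by
  intro ls
  induction ls with
  | nil => intro h; simp at h
  | cons l rest ih =>
    intro h
    simp only [List.any_cons, Bool.or_eq_true] at h
    rcases h with h | h
    · have : l = [] := by simpa [List.isEmpty_iff] using h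
      subst this; rfl
    · simp [pyProduct, ih h]

theorem foldl_extendAsc_single :
    ∀ (rest : List (List Int)) (chosen : List Int),
      rest.foldl extendAsc [chosen] =
        ((pyProduct rest).filter (fun c => ascFrom chosen.getLast? c)).map
          (fun c => chosen ++ c) := by
  intro rest
  induction rest with
  | nil =>
    intro chosen
    simp [pyProduct, List.filter, ascFrom_nil]
  | cons r rs ih =>
    intro chosen
    have h1 : extendAsc [chosen] r = r.flatMap (fun e => if okExt chosen e then [chosen ++ [e]] else []) := by
      simp [extendAsc]
    simp only [List.foldl_cons, h1, pyProduct]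
    rw [foldl_extendAsc_flatMap, filter_flatMap', map_flatMap']
    apply List.flatMap_congr
    intro e _
    rw [List.filter_map, List.map_map]
    by_cases hok : okExt chosen e
    · have hP : (fun c => ascFrom chosen.getLast? c) ∘ (fun c => e :: c)
          = fun c => ascFrom (some e) c := by
        funext c; simp [Function.comp, ascFrom_cons, hok]
      rw [hP]
      simp only [hok, if_true]
      rw [ih (chosen ++ [e]), List.getLast?_concat]
      apply List.map_congr_left
      intro c _
      simp [Function.comp, List.append_assoc]
    · have hok' : okExt chosen e = false := by simpa using hok
      have hP : (fun c => ascFrom chosen.getLast? c) ∘ (fun c => e :: c)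
          = fun _ => false := by
        funext c; simp [Function.comp, ascFrom_cons, hok']
      rw [hP]
      simp [hok', foldl_extendAsc_nil]

-- ===== VERDICT (by name: the statement is the Claim_ definition above) =====
theorem placeholder_find_helper_spec : Claim_equal_placeholder_find_helper := by
  intro template text case_sensitive _ _
  unfold Spec_placeholder_find_helper placeholder_find_helper placeholder_find_helper_alt
  rw [foldl_append_singleton]
  dsimp only
  by_cases hemp : ((if case_sensitive = true then template else List.map PySem.Str.lower template).map
      (fun p => occEnds p (if case_sensitive = true then text else PySem.Str.lower text))).any
      (fun r => r.isEmpty) = true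
  · rw [if_pos hemp, pyProduct_eq_nil_of_mem_nil _ hemp]
    simp
  · rw [if_neg hemp, foldl_extendAsc_single, List.map_map]
    simp only [List.nil_append, List.getLast?_nil]
    apply List.map_congr_left
    intro c _
    simpa using renderA_eq template text c
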